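-- pv_equiv track=rewrite | github.com/holstegelab/short_read_analyzing_pipeline_Snakemake | scripts/compare_bams_side_by_side.py | backlog_suffix_for_qname
-- ===== SOURCE A (Python) =====
-- def qname_of(line):
--     i = line.find('\t')
--     return line if i == -1 else line[:i]
--
-- def qname_base_of(line):
--     q = qname_of(line)
--     if len(q) > 2 and q[-2] == '/' and q[-1] in ('1', '2'):
--         return q[:-2]
--     return q
--
-- def backlog_suffix_for_qname(backlog, qn):
--     if not backlog:
--         return []
--     bl = list(backlog)
--     i = len(bl) - 1
--     while i >= 0 and qname_base_of(bl[i]) == qn: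
--         i -= 1
--     return bl[i+1:]
-- ===== SOURCE B (Python) =====
-- def qname_of(line):
--     i = line.find('\t')
--     return line if i == -1 else line[:i]
--
-- def qname_base_of(line):
--     q = qname_of(line)
--     if len(q) > 2 and q[-2] == '/' and q[-1] in ('1', '2'):
--         return q[:-2]
--     return q
--
-- def backlog_suffix_for_qname(backlog, qn):
--     bl = list(backlog)
--     j = -1
--     for idx, line in enumerate(bl):
--         if qname_base_of(line) != qn:
--             j = idx
--     return bl[j+1:]
-- ===== Notes on version B (the rewrite author's own statement) =====
-- stated objective: idiomatic
-- what changed: Replaces A's backward while-loop over a shrinking suffix with a single forward pass that records the last non-matching index as a boundary marker and slices after it.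
import Mathlib
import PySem

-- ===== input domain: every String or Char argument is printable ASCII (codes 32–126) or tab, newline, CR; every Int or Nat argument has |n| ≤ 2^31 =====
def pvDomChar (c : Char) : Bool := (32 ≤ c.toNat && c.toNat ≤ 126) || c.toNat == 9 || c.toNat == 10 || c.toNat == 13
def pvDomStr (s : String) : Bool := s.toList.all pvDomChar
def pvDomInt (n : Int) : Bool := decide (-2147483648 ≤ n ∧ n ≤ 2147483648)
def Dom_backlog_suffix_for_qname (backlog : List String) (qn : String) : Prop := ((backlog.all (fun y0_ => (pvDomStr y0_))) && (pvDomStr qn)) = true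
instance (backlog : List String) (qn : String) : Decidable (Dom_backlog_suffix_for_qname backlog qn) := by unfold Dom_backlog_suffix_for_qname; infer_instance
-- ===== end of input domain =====

-- B does a single forward pass recording the last non-matching index (boundary marker) instead of A's backward while-loop; same O(n) cost, more idiomatic.

-- ===== PORT A =====
-- shared helpers of both Python files (qname_of / qname_base_of are identical in Source A and Source B)
def qname_of (line : String) : String :=
  let i := PySem.Str.find line "\t"
  if i == -1 then line else PySem.Str.slice line none (some i)

def qname_base_of (line : String) : String :=
  let q := qname_of line
  if PySem.Str.len q > 2 && (PySem.Str.pyGet? q (-2) == some '/')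
      && (PySem.Str.pyGet? q (-1) == some '1' || PySem.Str.pyGet? q (-1) == some '2') then
    PySem.Str.slice q none (some (-2))
  else q

-- A's backward while-loop; the Nat argument k is i+1 (so k = 0 marks the Python i = -1 exit)
def aLoop (bl : List String) (qn : String) : Nat → Nat
  | 0 => 0
  | k+1 => if qname_base_of (bl.getD k "") == qn then aLoop bl qn k else k + 1

def backlog_suffix_for_qname (backlog : List String) (qn : String) : List String :=
  if backlog = [] then []
  else
    let bl := backlog
    PySem.List.slice bl (some ((aLoop bl qn bl.length : Nat) : Int)) none

-- ===== PORT B =====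
-- forward pass of Source B: idx counter and boundary marker j (j = -1 initially)
def bLoop (qn : String) : List String → Int → Int → Int
  | [], _, j => j
  | line :: rest, idx, j =>
    bLoop qn rest (idx + 1) (if qname_base_of line != qn then idx else j)

def backlog_suffix_for_qname_alt (backlog : List String) (qn : String) : List String :=
  let bl := backlog
  let j := bLoop qn bl 0 (-1)
  PySem.List.slice bl (some (j + 1)) none

-- ===== PRECONDITION & SPEC =====
def Spec_backlog_suffix_for_qname (backlog : List String) (qn : String) (out : List String) : Prop := out = backlog_suffix_for_qname_alt backlog qn
instance (backlog : List String) (qn : String) (out : List String) : Decidable (Spec_backlog_suffix_for_qname backlog qn out) := by unfold Spec_backlog_suffix_for_qname; infer_instance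

-- ===== CLAIM (what is proved, stated in full; the proofs are below) =====
def Claim_equal_backlog_suffix_for_qname : Prop := ∀ (backlog : List String) (qn : String), Dom_backlog_suffix_for_qname backlog qn → Spec_backlog_suffix_for_qname backlog qn (backlog_suffix_for_qname backlog qn)

-- ===== LEMMAS AND PROOFS =====
-- aLoop only reads indices < k, so appending an element does not change it
theorem aLoop_append (bl : List String) (x : String) (qn : String) :
    ∀ k, k ≤ bl.length → aLoop (bl ++ [x]) qn k = aLoop bl qn k := by
  intro k
  induction k with
  | zero => intro _; rfl
  | succ k ih =>
    intro hk
    have hlt : k < bl.length := by omega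
    have hget : (bl ++ [x]).getD k "" = bl.getD k "" := by
      simp [List.getD_eq_getElem?_getD, List.getElem?_append_left hlt]
    simp only [aLoop, hget]
    split
    · exact ih (by omega)
    · rfl

-- bLoop on a snoc: the last element wins if it does not match
theorem bLoop_append (qn : String) (x : String) :
    ∀ (bl : List String) (idx j : Int),
      bLoop qn (bl ++ [x]) idx j =
        if qname_base_of x != qn then idx + bl.length else bLoop qn bl idx j := by
  intro bl
  induction bl with
  | nil => intro idx j; simp [bLoop]
  | cons s rest ih =>
    intro idx j
    simp only [List.cons_append, bLoop, ih]
    split <;> simp <;> ring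

-- the boundary computed by both loops coincides: A's exit index i+1 equals B's j+1
theorem key (qn : String) : ∀ bl : List String,
    ((aLoop bl qn bl.length : Nat) : Int) = bLoop qn bl 0 (-1) + 1 := by
  intro bl
  induction bl using List.reverseRecOn with
  | nil => rfl
  | append_singleton bl x ih =>
    have hlen : (bl ++ [x]).length = bl.length + 1 := by simp
    have hget : (bl ++ [x]).getD bl.length "" = x := by
      simp [List.getD_eq_getElem?_getD]
    rw [hlen, bLoop_append]
    simp only [aLoop, hget]
    by_cases hm : qname_base_of x == qn
    · have : (qname_base_of x != qn) = false := by
        simp [bne] at hm ⊢; simp [hm]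
      rw [aLoop_append bl x qn bl.length (le_refl _)]
      simp [hm, this, ih]
    · have hne : (qname_base_of x != qn) = true := by
        simp [bne]; simpa using hm
      simp [hm, hne]

-- ===== VERDICT (by name: the statement is the Claim_ definition above) =====
theorem backlog_suffix_for_qname_spec : Claim_equal_backlog_suffix_for_qname := by
  intro backlog qn _
  unfold Spec_backlog_suffix_for_qname backlog_suffix_for_qname backlog_suffix_for_qname_alt
  by_cases h : backlog = []
  · subst h; simp [bLoop, PySem.List.slice]
  · simp only [h, if_false]
    rw [key qn backlog]
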